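-- pv_equiv track=rewrite | github.com/fantacyfromsjtu/Leetcode | Everyday/LCP 40. 心算挑战.py | maxmiumScore
-- ===== SOURCE A (Python) =====
-- from typing import List
--
-- def maxmiumScore(cards: List[int], cnt: int) -> int:
--     cardNum = len(cards)
--     odd = []
--     even = []
--     for card in cards:
--         if card % 2 == 0:
--             even.append(card)
--         else:
--             odd.append(card)
--     odd.sort(reverse=True)
--     even.sort(reverse=True)
--     oddNum = len(odd)
--     evenNum = len(even)
--
--     ## 判断失败情况
--     if oddNum % 2 == 1 and cnt == cardNum and cnt != 1:
--         return 0
--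
--     if cnt % 2 == 1 and evenNum == 0:
--         return 0
--
--     evenpos = 0
--     oddpos = 0
--     ans = 0
--
--     if cnt % 2 == 1:
--         cnt -= 1
--         evenpos +=1
--         ans += even[0]
--
--     while cnt > 0:
--         if evenNum -evenpos >= 2 and oddNum - oddpos >= 2:
--             if even[evenpos] + even[evenpos+1] > odd[oddpos] + odd[oddpos+1]:
--                 ans += even[evenpos] + even[evenpos+1]
--                 evenpos += 2
--             else:
--                 ans += odd[oddpos] + odd[oddpos+1]
--                 oddpos += 2
--             cnt -= 2
--
--         elif evenNum -evenpos >= 2: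
--             ans += even[evenpos] + even[evenpos+1]
--             evenpos += 2
--             cnt -= 2
--         else:
--             ans += odd[oddpos] + odd[oddpos+1]
--             oddpos += 2
--             cnt -= 2
--     return ans
-- ===== SOURCE B (Python) =====
-- def maxmiumScore(cards, cnt):
--     odds = sorted([c for c in cards if c % 2 != 0], reverse=True)
--     evens = sorted([c for c in cards if c % 2 == 0], reverse=True)
--     base = 0
--     if cnt % 2 == 1:
--         if not evens:
--             return 0
--         base = evens[0]
--         evens = evens[1:]
--         cnt -= 1
--
--     def pair_sums(xs):
--         it = iter(xs)
--         return [a + b for a, b in zip(it, it)]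
--
--     pairs = sorted(pair_sums(odds) + pair_sums(evens), reverse=True)
--     need = cnt // 2
--     if need > len(pairs):
--         return 0
--     return base + sum(pairs[:need])
-- ===== Notes on version B (the rewrite author's own statement) =====
-- stated objective: simpler
-- what changed: A repairs parity up front and then runs a four-cursor greedy while-loop that repeatedly compares the next even pair against the next odd pair; B computes all adjacent pair sums of the two sorted parity classes once, sorts them descending, and returns the base card plus the sum of the best cnt//2 pair sums (no stepwise greedy, no cursors).
-- outside the precondition, e.g. on maxmiumScore([2, 4, 6, 8, 10, 12], -1): A returns 12, B returns 30
-- crash fix: On inputs with 0 <= cnt where the deck cannot supply cnt parity-compatible cards (beyond the two impossible cases A checks explicitly), A raises IndexError while indexing past a parity list; B returns 0, the value A itself uses for the impossible cases it does detect. — e.g. on maxmiumScore([2], 3): A raises IndexError, B returns 0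
import Mathlib
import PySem

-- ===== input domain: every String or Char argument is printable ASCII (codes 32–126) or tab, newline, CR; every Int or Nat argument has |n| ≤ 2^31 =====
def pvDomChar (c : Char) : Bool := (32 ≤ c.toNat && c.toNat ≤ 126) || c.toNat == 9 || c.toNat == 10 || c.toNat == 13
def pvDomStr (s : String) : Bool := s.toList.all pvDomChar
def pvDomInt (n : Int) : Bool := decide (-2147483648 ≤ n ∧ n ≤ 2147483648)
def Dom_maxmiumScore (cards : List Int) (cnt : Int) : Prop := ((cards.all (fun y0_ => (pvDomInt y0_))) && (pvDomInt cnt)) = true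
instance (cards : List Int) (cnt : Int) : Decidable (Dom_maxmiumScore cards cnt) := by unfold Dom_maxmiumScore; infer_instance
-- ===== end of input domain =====

-- B replaces A's step-by-step greedy pairing by "sort all pair sums once, take the best prefix";
-- objective: simpler (the while loop with four cursors becomes one sort plus a prefix sum).

-- ===== PORT A =====
-- A's while loop: cursors into the two sorted lists; none = IndexError (Python raises there).
def pvALoop (even odd : List Int) (evenNum oddNum evenpos oddpos ans cnt : Int) : Option Int :=
  if 0 < cnt then
    if 2 ≤ evenNum - evenpos ∧ 2 ≤ oddNum - oddpos then
      match PySem.List.pyGet? even evenpos, PySem.List.pyGet? even (evenpos + 1),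
            PySem.List.pyGet? odd oddpos, PySem.List.pyGet? odd (oddpos + 1) with
      | some e1, some e2, some o1, some o2 =>
        if e1 + e2 > o1 + o2 then
          pvALoop even odd evenNum oddNum (evenpos + 2) oddpos (ans + (e1 + e2)) (cnt - 2)
        else
          pvALoop even odd evenNum oddNum evenpos (oddpos + 2) (ans + (o1 + o2)) (cnt - 2)
      | _, _, _, _ => none
    else if 2 ≤ evenNum - evenpos then
      match PySem.List.pyGet? even evenpos, PySem.List.pyGet? even (evenpos + 1) with
      | some e1, some e2 =>
          pvALoop even odd evenNum oddNum (evenpos + 2) oddpos (ans + (e1 + e2)) (cnt - 2)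
      | _, _ => none
    else
      match PySem.List.pyGet? odd oddpos, PySem.List.pyGet? odd (oddpos + 1) with
      | some o1, some o2 =>
          pvALoop even odd evenNum oddNum evenpos (oddpos + 2) (ans + (o1 + o2)) (cnt - 2)
      | _, _ => none
  else
    some ans
termination_by cnt.toNat
decreasing_by all_goals omega

def maxmiumScore (cards : List Int) (cnt : Int) : Int :=
  let cardNum : Int := cards.length
  -- the for-loop appending each card to odd / even
  let oe := cards.foldl
    (fun (acc : List Int × List Int) card =>
      if PySem.Int.mod card 2 == 0 then (acc.1, acc.2 ++ [card]) else (acc.1 ++ [card], acc.2))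
    (([], []) : List Int × List Int)
  let odd := PySem.List.sorted oe.1 (fun x => x) true
  let even := PySem.List.sorted oe.2 (fun x => x) true
  let oddNum : Int := odd.length
  let evenNum : Int := even.length
  if PySem.Int.mod oddNum 2 = 1 ∧ cnt = cardNum ∧ cnt ≠ 1 then 0
  else if PySem.Int.mod cnt 2 = 1 ∧ evenNum = 0 then 0
  else
    -- .getD 0 only discharges the Option; inside Pre_ the loop never returns none
    (if PySem.Int.mod cnt 2 = 1 then
        match PySem.List.pyGet? even 0 with
        | some e0 => pvALoop even odd evenNum oddNum 1 0 e0 (cnt - 1)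
        | none => none
      else pvALoop even odd evenNum oddNum 0 0 0 cnt).getD 0

-- ===== PORT B =====
-- pair_sums(xs): consecutive pairs via zip(it, it); the unpaired last element is dropped
def pvPairSums : List Int → List Int
  | x :: y :: t => (x + y) :: pvPairSums t
  | _ => []

def pvBTail (odds evens : List Int) (cnt base : Int) : Int :=
  let pairs := PySem.List.sorted (pvPairSums odds ++ pvPairSums evens) (fun x => x) true
  let need := PySem.Int.floordiv cnt 2
  if need > (pairs.length : Int) then 0
  else base + (PySem.List.slice pairs none (some need)).sum

def maxmiumScore_alt (cards : List Int) (cnt : Int) : Int :=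
  let odds := PySem.List.sorted (cards.filter (fun c => !(PySem.Int.mod c 2 == 0))) (fun x => x) true
  let evens := PySem.List.sorted (cards.filter (fun c => PySem.Int.mod c 2 == 0)) (fun x => x) true
  if PySem.Int.mod cnt 2 = 1 then
    match evens with
    | [] => 0
    | e0 :: evens' => pvBTail odds evens' (cnt - 1) e0
  else pvBTail odds evens cnt 0

-- ===== PRECONDITION & SPEC =====
def pvOddCount (cards : List Int) : Nat := (cards.filter (fun c => !(PySem.Int.mod c 2 == 0))).length
def pvEvenCount (cards : List Int) : Nat := (cards.filter (fun c => PySem.Int.mod c 2 == 0)).length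
-- A's two explicit impossible-case returns
def pvCond1 (cards : List Int) (cnt : Int) : Prop :=
  pvOddCount cards % 2 = 1 ∧ cnt = (cards.length : Int) ∧ cnt ≠ 1
def pvCond2 (cards : List Int) (cnt : Int) : Prop :=
  PySem.Int.mod cnt 2 = 1 ∧ pvEvenCount cards = 0
-- pairs A's loop still needs / pairs available after the odd-cnt prestep
def pvNeed (cnt : Int) : Int := if PySem.Int.mod cnt 2 = 1 then cnt - 1 else cnt
def pvAvail (cards : List Int) (cnt : Int) : Int :=
  2 * ((pvOddCount cards / 2 : Nat) : Int) +
    (if PySem.Int.mod cnt 2 = 1 then 2 * (((pvEvenCount cards - 1) / 2 : Nat) : Int)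
     else 2 * ((pvEvenCount cards / 2 : Nat) : Int))

-- Pre_ excludes negative cnt — outside the task's natural domain 0 ≤ cnt ≤ len(cards), where both
-- programs' values are loop artefacts — and the inputs on which A raises IndexError (not enough
-- parity-compatible cards to reach an even-sum selection of size cnt).
def Pre_maxmiumScore (cards : List Int) (cnt : Int) : Prop :=
  0 ≤ cnt ∧ (pvCond1 cards cnt ∨ pvCond2 cards cnt ∨ pvNeed cnt ≤ pvAvail cards cnt)
instance (cards : List Int) (cnt : Int) : Decidable (Pre_maxmiumScore cards cnt) := by
  unfold Pre_maxmiumScore pvCond1 pvCond2 pvNeed pvAvail pvOddCount pvEvenCount; infer_instance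
def pvWitness_maxmiumScore : List Int × Int := ([1, 2, 3, 4], 2)

-- A raises IndexError when the cards cannot supply cnt cards of even total (beyond the two cases
-- it checks explicitly); B returns 0 there, the natural value for an impossible request.
def Raises_maxmiumScore (cards : List Int) (cnt : Int) : Prop :=
  ¬ pvCond1 cards cnt ∧ ¬ pvCond2 cards cnt ∧ pvAvail cards cnt < pvNeed cnt
instance (cards : List Int) (cnt : Int) : Decidable (Raises_maxmiumScore cards cnt) := by
  unfold Raises_maxmiumScore pvCond1 pvCond2 pvNeed pvAvail pvOddCount pvEvenCount; infer_instance
def pvRaiseWitness_maxmiumScore : List Int × Int := ([2], 3)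
def pvRaiseWitnessOut_maxmiumScore : Int := 0

def Spec_maxmiumScore (cards : List Int) (cnt : Int) (out : Int) : Prop := out = maxmiumScore_alt cards cnt
instance (cards : List Int) (cnt : Int) (out : Int) : Decidable (Spec_maxmiumScore cards cnt out) := by
  unfold Spec_maxmiumScore; infer_instance

-- ===== CLAIM (what is proved, stated in full; the proofs are below) =====
def Claim_equal_maxmiumScore : Prop := ∀ (cards : List Int) (cnt : Int), Dom_maxmiumScore cards cnt → Pre_maxmiumScore cards cnt → Spec_maxmiumScore cards cnt (maxmiumScore cards cnt)
def Claim_raises_maxmiumScore : Prop := (∀ (cards : List Int) (cnt : Int), Dom_maxmiumScore cards cnt → Raises_maxmiumScore cards cnt → ¬ Pre_maxmiumScore cards cnt) ∧ (Dom_maxmiumScore (pvRaiseWitness_maxmiumScore.1) (pvRaiseWitness_maxmiumScore.2) ∧ Raises_maxmiumScore (pvRaiseWitness_maxmiumScore.1) (pvRaiseWitness_maxmiumScore.2) ∧ maxmiumScore_alt (pvRaiseWitness_maxmiumScore.1) (pvRaiseWitness_maxmiumScore.2) = pvRaiseWitnessOut_maxmiumScore)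

-- ===== LEMMAS AND PROOFS =====

-- A's building loop is the pair of filters
lemma pvBuild_eq (l : List Int) (a b : List Int) :
    l.foldl
      (fun (acc : List Int × List Int) card =>
        if PySem.Int.mod card 2 == 0 then (acc.1, acc.2 ++ [card]) else (acc.1 ++ [card], acc.2))
      (a, b)
    = (a ++ l.filter (fun c => !(PySem.Int.mod c 2 == 0)), b ++ l.filter (fun c => PySem.Int.mod c 2 == 0)) := by
  induction l generalizing a b with
  | nil => simp
  | cons x t ih =>
    by_cases hx : (PySem.Int.mod x 2 == 0) = true <;>
      simp only [List.foldl_cons, List.filter_cons, hx, Bool.not_true, Bool.not_false,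
        if_true, if_false, ih, List.append_assoc, Bool.false_eq_true] <;>
      simp

lemma pvPairSums_length : ∀ l : List Int, (pvPairSums l).length = l.length / 2
  | [] => rfl
  | [_] => by simp [pvPairSums]
  | _ :: _ :: t => by
    simp [pvPairSums, pvPairSums_length t]
    omega

lemma pvPairSums_short (l : List Int) (h : l.length ≤ 1) : pvPairSums l = [] := by
  match l, h with
  | [], _ => rfl
  | [_], _ => rfl

lemma pvPairSums_mem : ∀ (l : List Int), ∀ z ∈ pvPairSums l, ∃ u ∈ l, ∃ v ∈ l, z = u + v
  | [], z, hz => by simp [pvPairSums] at hz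
  | [x], z, hz => by simp [pvPairSums] at hz
  | x :: y :: t, z, hz => by
    simp only [pvPairSums, List.mem_cons] at hz
    rcases hz with rfl | hz
    · exact ⟨x, by simp, y, by simp, rfl⟩
    · obtain ⟨u, hu, v, hv, rfl⟩ := pvPairSums_mem t z hz
      exact ⟨u, by simp [hu], v, by simp [hv], rfl⟩

lemma pvPairSums_pairwise : ∀ (l : List Int), l.Pairwise (fun a b => b ≤ a) →
    (pvPairSums l).Pairwise (fun a b => b ≤ a)
  | [], _ => by simp [pvPairSums]
  | [x], _ => by simp [pvPairSums]
  | x :: y :: t, h => by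
    have hx : ∀ w ∈ t, w ≤ x := fun w hw => (List.pairwise_cons.mp h).1 w (by simp [hw])
    have h' := (List.pairwise_cons.mp h).2
    have hy : ∀ w ∈ t, w ≤ y := fun w hw => (List.pairwise_cons.mp h').1 w hw
    have ht : t.Pairwise (fun a b => b ≤ a) := (List.pairwise_cons.mp h').2
    rw [show pvPairSums (x :: y :: t) = (x + y) :: pvPairSums t from rfl]
    refine List.pairwise_cons.mpr ⟨?_, pvPairSums_pairwise t ht⟩
    intro z hz
    obtain ⟨u, hu, v, hv, rfl⟩ := pvPairSums_mem t z hz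
    have h1 := hx u hu
    have h2 := hy v hv
    omega

-- naming the head of a descending sort: sorted(l, reverse=True) = x :: sorted(l', reverse=True)
-- whenever l is a permutation of x :: l' and x dominates l'
lemma pvSortD_cons (x : Int) (l l' : List Int) (hperm : l.Perm (x :: l'))
    (hx : ∀ y ∈ l', y ≤ x) :
    PySem.List.sorted l (fun z => z) true = x :: PySem.List.sorted l' (fun z => z) true := by
  apply PySem.List.eq_of_perm_of_pairwise_le_of_injective (fun z : Int => -z) neg_injective
  · exact ((PySem.List.sorted_perm l _ true).trans hperm).trans
      (((PySem.List.sorted_perm l' _ true).symm).cons x)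
  · exact (PySem.List.sorted_pairwise_rev l (fun z => z)).imp (fun h => by omega)
  · refine List.pairwise_cons.mpr ⟨?_, (PySem.List.sorted_pairwise_rev l' (fun z => z)).imp (fun h => by omega)⟩
    intro y hy
    have := hx y ((PySem.List.mem_sorted l' _ true y).mp hy)
    omega

lemma pvTwoSplit {l : List Int} (h : 2 ≤ l.length) : ∃ a b t, l = a :: b :: t := by
  match l, h with
  | a :: b :: t, _ => exact ⟨a, b, t, rfl⟩

-- the invariant of A's while loop: it adds up the `p` largest pair sums still reachable
lemma pvALoop_eq (even odd : List Int)
    (hE : even.Pairwise (fun a b => b ≤ a)) (hO : odd.Pairwise (fun a b => b ≤ a)) :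
    ∀ (p i j : Nat) (ans : Int), i ≤ even.length → j ≤ odd.length →
      p ≤ (even.length - i) / 2 + (odd.length - j) / 2 →
      pvALoop even odd (even.length : Int) (odd.length : Int) (i : Int) (j : Int) ans (2 * (p : Int)) =
        some (ans + ((PySem.List.sorted (pvPairSums (odd.drop j) ++ pvPairSums (even.drop i))
          (fun z => z) true).take p).sum) := by
  intro p
  induction p with
  | zero =>
    intro i j ans hi hj hav
    rw [pvALoop]
    simp
  | succ p ih =>
    intro i j ans hi hj hav
    have hEd : (even.drop i).Pairwise (fun a b => b ≤ a) := hE.sublist (List.drop_sublist _ _)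
    have hOd : (odd.drop j).Pairwise (fun a b => b ≤ a) := hO.sublist (List.drop_sublist _ _)
    rw [pvALoop]
    rw [if_pos (by omega : (0:Int) < 2 * ((p + 1 : Nat) : Int))]
    have hstep1 : ((i : Int) + 2) = (((i + 2 : Nat)) : Int) := by push_cast; ring
    have hstep2 : ((j : Int) + 2) = (((j + 2 : Nat)) : Int) := by push_cast; ring
    have hcnt : 2 * (((p + 1 : Nat)) : Int) - 2 = 2 * (p : Int) := by push_cast; ring
    by_cases h2E : i + 2 ≤ even.length
    · -- at least two even cards remain
      obtain ⟨e1, e2, E'', hEeq⟩ := pvTwoSplit (l := even.drop i)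
        (by rw [List.length_drop]; omega)
      have hEdrop : even.drop (i + 2) = E'' := by
        rw [← List.drop_drop, hEeq]; rfl
      have g1 : PySem.List.pyGet? even (i : Int) = some e1 := by
        rw [PySem.List.pyGet?_natCast]
        have h0 : (even.drop i)[0]? = some e1 := by rw [hEeq]; rfl
        rw [List.getElem?_drop] at h0; simpa using h0
      have g2 : PySem.List.pyGet? even ((i : Int) + 1) = some e2 := by
        rw [show ((i : Int) + 1) = (((i + 1 : Nat)) : Int) by push_cast; ring,
          PySem.List.pyGet?_natCast]
        have h0 : (even.drop i)[1]? = some e2 := by rw [hEeq]; rfl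
        rw [List.getElem?_drop] at h0; simpa using h0
      have hEp := pvPairSums_pairwise _ hEd
      rw [hEeq] at hEp
      rw [show pvPairSums (e1 :: e2 :: E'') = (e1 + e2) :: pvPairSums E'' from rfl] at hEp
      by_cases h2O : j + 2 ≤ odd.length
      · -- both branches available: compare the two top pair sums
        obtain ⟨o1, o2, O'', hOeq⟩ := pvTwoSplit (l := odd.drop j)
          (by rw [List.length_drop]; omega)
        have hOdrop : odd.drop (j + 2) = O'' := by
          rw [← List.drop_drop, hOeq]; rfl
        have g3 : PySem.List.pyGet? odd (j : Int) = some o1 := by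
          rw [PySem.List.pyGet?_natCast]
          have h0 : (odd.drop j)[0]? = some o1 := by rw [hOeq]; rfl
          rw [List.getElem?_drop] at h0; simpa using h0
        have g4 : PySem.List.pyGet? odd ((j : Int) + 1) = some o2 := by
          rw [show ((j : Int) + 1) = (((j + 1 : Nat)) : Int) by push_cast; ring,
            PySem.List.pyGet?_natCast]
          have h0 : (odd.drop j)[1]? = some o2 := by rw [hOeq]; rfl
          rw [List.getElem?_drop] at h0; simpa using h0
        have hOp := pvPairSums_pairwise _ hOd
        rw [hOeq] at hOp
        rw [show pvPairSums (o1 :: o2 :: O'') = (o1 + o2) :: pvPairSums O'' from rfl] at hOp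
        rw [if_pos (by omega :
          (2 ≤ (even.length : Int) - (i : Int) ∧ 2 ≤ (odd.length : Int) - (j : Int)))]
        simp only [g1, g2, g3, g4]
        by_cases hgt : e1 + e2 > o1 + o2
        · rw [if_pos hgt, hstep1, hcnt,
            ih (i + 2) j (ans + (e1 + e2)) (by omega) hj
              (by omega)]
          have hkey : PySem.List.sorted (pvPairSums (odd.drop j) ++ pvPairSums (even.drop i))
              (fun z => z) true
              = (e1 + e2) :: PySem.List.sorted (pvPairSums (odd.drop j) ++ pvPairSums E'')
                (fun z => z) true := by
            apply pvSortD_cons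
            · rw [hEeq, show pvPairSums (e1 :: e2 :: E'') = (e1 + e2) :: pvPairSums E'' from rfl]
              exact List.perm_middle
            · intro y hy
              rcases List.mem_append.mp hy with hy | hy
              · rw [hOeq] at hy
                rw [show pvPairSums (o1 :: o2 :: O'') = (o1 + o2) :: pvPairSums O'' from rfl] at hy
                rcases List.mem_cons.mp hy with rfl | hy
                · omega
                · have := List.rel_of_pairwise_cons hOp hy; omega
              · exact List.rel_of_pairwise_cons hEp hy
          rw [hEdrop, hkey, List.take_succ_cons, List.sum_cons]
          congr 1
          ring
        · rw [if_neg hgt, hstep2, hcnt,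
            ih i (j + 2) (ans + (o1 + o2)) hi (by omega)
              (by omega)]
          have hkey : PySem.List.sorted (pvPairSums (odd.drop j) ++ pvPairSums (even.drop i))
              (fun z => z) true
              = (o1 + o2) :: PySem.List.sorted (pvPairSums O'' ++ pvPairSums (even.drop i))
                (fun z => z) true := by
            apply pvSortD_cons
            · rw [hOeq, show pvPairSums (o1 :: o2 :: O'') = (o1 + o2) :: pvPairSums O'' from rfl]
              simp
            · intro y hy
              rcases List.mem_append.mp hy with hy | hy
              · exact List.rel_of_pairwise_cons hOp hy
              · rw [hEeq] at hy
                rw [show pvPairSums (e1 :: e2 :: E'') = (e1 + e2) :: pvPairSums E'' from rfl] at hy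
                rcases List.mem_cons.mp hy with rfl | hy
                · omega
                · have := List.rel_of_pairwise_cons hEp hy; omega
          rw [hOdrop, hkey, List.take_succ_cons, List.sum_cons]
          congr 1
          ring
      · -- fewer than two odd cards remain: forced even pair
        have hPOnil : pvPairSums (odd.drop j) = [] :=
          pvPairSums_short _ (by rw [List.length_drop]; omega)
        rw [if_neg (by omega :
          ¬(2 ≤ (even.length : Int) - (i : Int) ∧ 2 ≤ (odd.length : Int) - (j : Int)))]
        rw [if_pos (by omega : (2 ≤ (even.length : Int) - (i : Int)))]
        simp only [g1, g2]
        rw [hstep1, hcnt,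
          ih (i + 2) j (ans + (e1 + e2)) (by omega) hj
            (by omega)]
        have hkey : PySem.List.sorted (pvPairSums (odd.drop j) ++ pvPairSums (even.drop i))
            (fun z => z) true
            = (e1 + e2) :: PySem.List.sorted (pvPairSums (odd.drop j) ++ pvPairSums E'')
              (fun z => z) true := by
          apply pvSortD_cons
          · rw [hEeq, show pvPairSums (e1 :: e2 :: E'') = (e1 + e2) :: pvPairSums E'' from rfl]
            exact List.perm_middle
          · intro y hy
            rcases List.mem_append.mp hy with hy | hy
            · rw [hPOnil] at hy; simp at hy
            · exact List.rel_of_pairwise_cons hEp hy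
        rw [hEdrop, hkey, List.take_succ_cons, List.sum_cons]
        congr 1
        ring
    · -- fewer than two even cards remain: forced odd pair
      have h2O : j + 2 ≤ odd.length := by
        have h1 : (even.length - i) / 2 = 0 := by omega
        omega
      have hPEnil : pvPairSums (even.drop i) = [] :=
        pvPairSums_short _ (by rw [List.length_drop]; omega)
      obtain ⟨o1, o2, O'', hOeq⟩ := pvTwoSplit (l := odd.drop j)
        (by rw [List.length_drop]; omega)
      have hOdrop : odd.drop (j + 2) = O'' := by
        rw [← List.drop_drop, hOeq]; rfl
      have g3 : PySem.List.pyGet? odd (j : Int) = some o1 := by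
        rw [PySem.List.pyGet?_natCast]
        have h0 : (odd.drop j)[0]? = some o1 := by rw [hOeq]; rfl
        rw [List.getElem?_drop] at h0; simpa using h0
      have g4 : PySem.List.pyGet? odd ((j : Int) + 1) = some o2 := by
        rw [show ((j : Int) + 1) = (((j + 1 : Nat)) : Int) by push_cast; ring,
          PySem.List.pyGet?_natCast]
        have h0 : (odd.drop j)[1]? = some o2 := by rw [hOeq]; rfl
        rw [List.getElem?_drop] at h0; simpa using h0
      have hOp := pvPairSums_pairwise _ hOd
      rw [hOeq] at hOp
      rw [show pvPairSums (o1 :: o2 :: O'') = (o1 + o2) :: pvPairSums O'' from rfl] at hOp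
      rw [if_neg (by omega :
        ¬(2 ≤ (even.length : Int) - (i : Int) ∧ 2 ≤ (odd.length : Int) - (j : Int)))]
      rw [if_neg (by omega : ¬(2 ≤ (even.length : Int) - (i : Int)))]
      simp only [g3, g4]
      rw [hstep2, hcnt,
        ih i (j + 2) (ans + (o1 + o2)) hi (by omega)
          (by omega)]
      have hkey : PySem.List.sorted (pvPairSums (odd.drop j) ++ pvPairSums (even.drop i))
          (fun z => z) true
          = (o1 + o2) :: PySem.List.sorted (pvPairSums O'' ++ pvPairSums (even.drop i))
            (fun z => z) true := by
        apply pvSortD_cons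
        · rw [hOeq, show pvPairSums (o1 :: o2 :: O'') = (o1 + o2) :: pvPairSums O'' from rfl]
          simp
        · intro y hy
          rcases List.mem_append.mp hy with hy | hy
          · exact List.rel_of_pairwise_cons hOp hy
          · rw [hPEnil] at hy; simp at hy
      rw [hOdrop, hkey, List.take_succ_cons, List.sum_cons]
      congr 1
      ring

lemma pvFilterLen (l : List Int) (p : Int → Bool) :
    (l.filter (fun c => !(p c))).length + (l.filter p).length = l.length := by
  induction l with
  | nil => simp
  | cons x t ih => by_cases hx : p x <;> simp [hx] <;> omega

-- ===== VERDICT =====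
theorem maxmiumScore_spec : Claim_equal_maxmiumScore := by
  intro cards cnt _ hpre
  obtain ⟨hc0, hdisj⟩ := hpre
  show maxmiumScore cards cnt = maxmiumScore_alt cards cnt
  simp only [maxmiumScore, maxmiumScore_alt, pvBuild_eq, List.nil_append]
  set Fo := cards.filter (fun c => !(PySem.Int.mod c 2 == 0)) with hFo
  set Fe := cards.filter (fun c => PySem.Int.mod c 2 == 0) with hFe
  set O := PySem.List.sorted Fo (fun x => x) true with hOdef
  set E := PySem.List.sorted Fe (fun x => x) true with hEdef
  have hOlen : O.length = Fo.length := PySem.List.length_sorted Fo _ true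
  have hElen : E.length = Fe.length := PySem.List.length_sorted Fe _ true
  have hn : Fo.length + Fe.length = cards.length := pvFilterLen cards _
  have hocount : pvOddCount cards = Fo.length := rfl
  have hecount : pvEvenCount cards = Fe.length := rfl
  have hOp : O.Pairwise (fun a b => b ≤ a) := PySem.List.sorted_pairwise_rev Fo (fun z => z)
  have hEp : E.Pairwise (fun a b => b ≤ a) := PySem.List.sorted_pairwise_rev Fe (fun z => z)
  clear_value O E
  clear_value Fo Fe
  have hmodc : PySem.Int.mod cnt 2 = cnt % 2 := PySem.Int.mod_eq_emod_of_pos (by norm_num)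
  have hmodO : PySem.Int.mod (O.length : Int) 2 = (O.length : Int) % 2 :=
    PySem.Int.mod_eq_emod_of_pos (by norm_num)
  have hfeas : ¬ (PySem.Int.mod (O.length : Int) 2 = 1 ∧ cnt = (cards.length : Int) ∧ cnt ≠ 1) →
      ¬ (PySem.Int.mod cnt 2 = 1 ∧ (E.length : Int) = 0) →
      pvNeed cnt ≤ pvAvail cards cnt := by
    intro h1 h2
    rcases hdisj with hc | hc | hc
    · refine absurd ⟨?_, hc.2.1, hc.2.2⟩ h1
      rw [hmodO]
      have h := hc.1
      rw [hocount] at h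
      omega
    · refine absurd ⟨hc.1, ?_⟩ h2
      have h := hc.2
      rw [hecount] at h
      omega
    · exact hc
  by_cases h1 : PySem.Int.mod (O.length : Int) 2 = 1 ∧ cnt = (cards.length : Int) ∧ cnt ≠ 1
  · -- A's first impossible case: taking all cards with an odd number of odd ones
    rw [if_pos h1]
    obtain ⟨ho1, hceq, hcne⟩ := h1
    rw [hmodO] at ho1
    by_cases hodd : PySem.Int.mod cnt 2 = 1
    · rw [if_pos hodd]
      rw [hmodc] at hodd
      cases hEeq : E with
      | nil => rfl
      | cons e0 E' =>
        have hE'len : E'.length = Fe.length - 1 := by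
          have h := hElen; rw [hEeq] at h; simp at h; omega
        have hFe1 : 1 ≤ Fe.length := by
          have h := hElen; rw [hEeq] at h; simp at h; omega
        show (0 : Int) = pvBTail O E' (cnt - 1) e0
        simp only [pvBTail]
        rw [if_pos ?_]
        rw [PySem.Int.floordiv_eq_ediv_of_pos (by norm_num), PySem.List.length_sorted,
          List.length_append, pvPairSums_length, pvPairSums_length, hOlen, hE'len]
        omega
    · rw [if_neg hodd]
      rw [hmodc] at hodd
      simp only [pvBTail]
      rw [if_pos ?_]
      rw [PySem.Int.floordiv_eq_ediv_of_pos (by norm_num), PySem.List.length_sorted,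
        List.length_append, pvPairSums_length, pvPairSums_length, hOlen, hElen]
      omega
  · rw [if_neg h1]
    by_cases h2 : PySem.Int.mod cnt 2 = 1 ∧ (E.length : Int) = 0
    · rw [if_pos h2, if_pos h2.1]
      have hEnil : E = [] := List.length_eq_zero_iff.mp (by exact_mod_cast h2.2)
      rw [hEnil]
    · rw [if_neg h2]
      have hfe := hfeas h1 h2
      rw [pvNeed, pvAvail, hocount, hecount] at hfe
      by_cases hodd : PySem.Int.mod cnt 2 = 1
      · -- odd cnt: both sides take the largest even card, then p best pairs
        rw [if_pos hodd, if_pos hodd]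
        simp only [if_pos hodd] at hfe
        rw [hmodc] at hodd
        have hEne : E ≠ [] := by
          intro hnil
          exact h2 ⟨by rwa [hmodc], by rw [hnil]; simp⟩
        cases hEeq : E with
        | nil => exact absurd hEeq hEne
        | cons e0 E' =>
          have hE'len : E'.length = Fe.length - 1 := by
            have h := hElen; rw [hEeq] at h; simp at h; omega
          have hFe1 : 1 ≤ Fe.length := by
            have h := hElen; rw [hEeq] at h; simp at h; omega
          obtain ⟨p, hp⟩ : ∃ p : Nat, cnt - 1 = 2 * (p : Int) := ⟨((cnt - 1) / 2).toNat, by omega⟩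
          have hpav : p ≤ (Fe.length - 1) / 2 + Fo.length / 2 := by omega
          have hloop := pvALoop_eq E O hEp hOp p 1 0 e0 (by omega) (by omega) (by omega)
          simp only [Nat.cast_one, Nat.cast_zero, List.drop_zero] at hloop
          have hd1 : E.drop 1 = E' := by rw [hEeq]; rfl
          rw [hd1, hEeq] at hloop
          rw [hp]
          simp only [PySem.List.pyGet?_zero_cons, hloop, Option.getD_some]
          show e0 + _ = pvBTail O E' (2 * (p : Int)) e0
          simp only [pvBTail]
          have hneed : PySem.Int.floordiv (2 * (p : Int)) 2 = (p : Int) := by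
            rw [PySem.Int.floordiv_eq_ediv_of_pos (by norm_num)]; omega
          rw [hneed, if_neg ?_, PySem.List.slice_to _ (by omega), Int.toNat_natCast]
          rw [PySem.List.length_sorted, List.length_append, pvPairSums_length,
            pvPairSums_length, hOlen, hE'len]
          omega
      · rw [if_neg hodd, if_neg hodd]
        simp only [if_neg hodd] at hfe
        rw [hmodc] at hodd
        obtain ⟨p, hp⟩ : ∃ p : Nat, cnt = 2 * (p : Int) := ⟨(cnt / 2).toNat, by omega⟩
        have hpav : p ≤ Fe.length / 2 + Fo.length / 2 := by omega
        have hloop := pvALoop_eq E O hEp hOp p 0 0 0 (by omega) (by omega) (by omega)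
        simp only [Nat.cast_zero, List.drop_zero] at hloop
        rw [hp, hloop]
        show (0 : Int) + _ = pvBTail O E (2 * (p : Int)) 0
        simp only [pvBTail]
        have hneed : PySem.Int.floordiv (2 * (p : Int)) 2 = (p : Int) := by
          rw [PySem.Int.floordiv_eq_ediv_of_pos (by norm_num)]; omega
        rw [hneed, if_neg ?_, PySem.List.slice_to _ (by omega), Int.toNat_natCast]
        rw [PySem.List.length_sorted, List.length_append, pvPairSums_length,
          pvPairSums_length, hOlen, hElen]
        omega

@[simp] theorem maxmiumScore_raises : Claim_raises_maxmiumScore := by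
  unfold Claim_raises_maxmiumScore
  constructor
  · intro cards cnt _ hr hp
    exact absurd hp (by
      intro ⟨_, h⟩
      rcases h with h | h | h
      · exact hr.1 h
      · exact hr.2.1 h
      · exact absurd h (by exact not_le.mpr hr.2.2) )
  · refine ⟨by decide, by decide, by decide⟩
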